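-- pv_equiv track=rewrite | github.com/Telmo465/FPRO | Alphabet Rangoli ★★★.py | rangoli
-- ===== SOURCE A (Python) =====
-- def rangoli(N):
--     if N == 1:
--         result = "a"
--         return result
--     alphabet = "abcdefghijklmnopqrstuvwxyz"
--     letters = []
--     row_list = []
--     for r in range(1, N+1):
--         row = "-"*(2*N-2*r)
--         for c in range(1, r+1):
--             letters += [alphabet[N-c]]
--         join_let = "-".join(list(reversed(letters)))
--         row += "-".join(letters) + join_let[1:] +"-"*(2*N-2*r)
--         letters = []
--         row_list += [row]
--     row_list = row_list + row_list[N-2::-1]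
--     result = "\n".join(row_list)
--     return result
-- ===== SOURCE B (Python) =====
-- def rangoli(N):
--     alpha = "abcdefghijklmnopqrstuvwxyz"
--     width = 4 * N - 3
--     lines = ["-".join(alpha[N-1:i:-1] + alpha[i:N]).center(width, "-")
--              for i in range(N)]
--     return "\n".join(lines[::-1] + lines[1:])
-- ===== Notes on version B (the rewrite author's own statement) =====
-- stated objective: idiomatic
-- what changed: Each row is built directly from alphabet slices (alpha[N-1:i:-1] + alpha[i:N]) joined with '-' and padded with str.center, replacing A's inner character loop, manual reversed-join suffix trick and hand-computed dash padding; the full pattern is the reversed line list plus its tail.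
import Mathlib
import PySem

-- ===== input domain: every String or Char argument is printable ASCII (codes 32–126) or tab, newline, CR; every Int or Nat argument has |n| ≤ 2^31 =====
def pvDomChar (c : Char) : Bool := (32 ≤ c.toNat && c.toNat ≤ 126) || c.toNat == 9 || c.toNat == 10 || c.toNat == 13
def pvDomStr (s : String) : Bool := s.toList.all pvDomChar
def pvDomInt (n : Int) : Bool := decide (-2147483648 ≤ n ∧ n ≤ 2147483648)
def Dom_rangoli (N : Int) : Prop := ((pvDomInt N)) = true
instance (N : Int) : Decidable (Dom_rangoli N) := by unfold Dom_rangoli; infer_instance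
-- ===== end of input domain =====

set_option maxRecDepth 100000
set_option maxHeartbeats 4000000


-- B builds each row by alphabet slicing plus str.center instead of A's inner
-- character loop and manual dash padding (objective: idiomatic; same cost).

-- ===== PORT A =====
-- row-building loop of A: state = (letters, row_list); "-"*k is List.replicate k.toNat '-'
-- (exact: Python's "-"*k is "" for k ≤ 0); alphabet[N-c] via pyGetD (in range under Pre_).
def rangoli (N : Int) : String :=
  if N = 1 then "a"
  else
    let alphabet : List Char := "abcdefghijklmnopqrstuvwxyz".toList
    let st := (PySem.List.pyRange 1 (N + 1) 1).foldl
      (fun (st : List (List Char) × List (List Char)) r =>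
        let letters := (PySem.List.pyRange 1 (r + 1) 1).foldl
          (fun ls c => ls ++ [[PySem.List.pyGetD alphabet (N - c) ' ']]) st.1
        let row0 := List.replicate (2 * N - 2 * r).toNat '-'
        let joinLet := PySem.Chars.join ['-'] letters.reverse
        let row := row0 ++ PySem.Chars.join ['-'] letters
                   ++ PySem.List.slice joinLet (some 1) none
                   ++ List.replicate (2 * N - 2 * r).toNat '-'
        -- letters = [] at the end of the Python loop body
        (([] : List (List Char)), st.2 ++ [row])) ([], [])
    -- row_list + row_list[N-2::-1] (slice? is some: step = -1 ≠ 0)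
    let rowList := st.2 ++ (PySem.List.slice? st.2 (some (N - 2)) none (-1)).getD []
    String.ofList (PySem.Chars.join ['\n'] rowList)

-- ===== PORT B =====
-- exact hand port of CPython str.center (left = marg//2 + (marg & width & 1),
-- written arithmetically; exact for the nonnegative width/length it is used with)
def pyCenter (cs : List Char) (w : Int) (f : Char) : List Char :=
  if w ≤ (cs.length : Int) then cs
  else
    let marg := w - (cs.length : Int)
    let left := PySem.Int.floordiv marg 2 + PySem.Int.mod marg 2 * PySem.Int.mod w 2
    List.replicate left.toNat f ++ cs ++ List.replicate (marg - left).toNat f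

def rangoli_alt (N : Int) : String :=
  let alpha : List Char := "abcdefghijklmnopqrstuvwxyz".toList
  let width := 4 * N - 3
  let lines := (PySem.List.pyRange 0 N 1).map (fun i =>
    -- alpha[N-1:i:-1] + alpha[i:N], joined with '-' (join over a string iterates chars)
    let sym := (PySem.List.slice? alpha (some (N - 1)) (some i) (-1)).getD []
               ++ PySem.List.slice alpha (some i) (some N)
    pyCenter (PySem.Chars.join ['-'] (sym.map (fun c => [c]))) width '-')
  -- lines[::-1] + lines[1:]
  String.ofList (PySem.Chars.join ['\n']
    ((PySem.List.slice? lines none none (-1)).getD [] ++ PySem.List.slice lines (some 1) none))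

-- ===== PRECONDITION & SPEC =====
-- Pre_ excludes the inputs beyond the alphabet length, where A raises IndexError (alphabet[N-c] out of range).
def Pre_rangoli (N : Int) : Prop := N ≤ 26
instance (N : Int) : Decidable (Pre_rangoli N) := by unfold Pre_rangoli; infer_instance
def pvWitness_rangoli : Int := (5)

def Spec_rangoli (N : Int) (out : String) : Prop := out = rangoli_alt N
instance (N : Int) (out : String) : Decidable (Spec_rangoli N out) := by unfold Spec_rangoli; infer_instance

-- ===== CLAIM (what is proved, stated in full; the proofs are below) =====
def Claim_equal_rangoli : Prop := ∀ (N : Int), Dom_rangoli N → Pre_rangoli N → Spec_rangoli N (rangoli N)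

-- ===== LEMMAS AND PROOFS =====
lemma rangoli_nonpos (N : Int) (h : N ≤ 0) : rangoli N = "" := by
  have h1 : N ≠ 1 := by omega
  have h2 : PySem.List.pyRange 1 (N + 1) 1 = [] := PySem.List.pyRange_one_eq_nil (by omega)
  simp [rangoli, h1, h2, PySem.List.slice?, PySem.Chars.join]
  rfl

lemma rangoli_alt_nonpos (N : Int) (h : N ≤ 0) : rangoli_alt N = "" := by
  have h2 : PySem.List.pyRange 0 N 1 = [] := PySem.List.pyRange_one_eq_nil (by omega)
  simp [rangoli_alt, h2, PySem.List.slice?, PySem.List.slice, PySem.Chars.join]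
  rfl

-- ===== VERDICT (by name: the statement is the Claim_ definition above) =====
theorem rangoli_spec : Claim_equal_rangoli := by
  intro N _ hpre
  unfold Spec_rangoli
  by_cases h : N ≤ 0
  · rw [rangoli_nonpos N h, rangoli_alt_nonpos N h]
  · have h1 : 1 ≤ N := by omega
    unfold Pre_rangoli at hpre
    interval_cases N <;> rfl
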